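-- pv_equiv track=rewrite | github.com/ejmiddle/neckar_wave_scripts2 | pages/8_Accounting.py | _find_accounting_type_by_exact_names
-- ===== SOURCE A (Python) =====
-- from typing import Any
--
-- def _flag_as_bool(value: Any) -> bool:
--     if isinstance(value, bool):
--         return value
--     return str(value).strip() == "1"
--
-- def _active_accounting_type_rows(rows: list[dict[str, Any]]) -> list[dict[str, Any]]:
--     active_rows = [
--         row
--         for row in rows
--         if _flag_as_bool(row.get("active", True)) and str(row.get("status", "100")) == "100"
--     ]
--     return active_rows or rows
--
-- def _find_accounting_type_by_exact_names(
--     rows: list[dict[str, Any]],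
--     names: list[str],
-- ) -> dict[str, Any] | None:
--     candidates = _active_accounting_type_rows(rows)
--     wanted_names = [name.strip().lower() for name in names if name.strip()]
--     for wanted in wanted_names:
--         for row in candidates:
--             name = str(row.get("name", "")).strip().lower()
--             if name == wanted:
--                 return row
--     return None
-- ===== SOURCE B (Python) =====
-- from typing import Any
--
--
-- def _flag_as_bool(value: Any) -> bool:
--     if isinstance(value, bool):
--         return value
--     return str(value).strip() == "1"
--
--
-- def _active_accounting_type_rows(rows: list[dict[str, Any]]) -> list[dict[str, Any]]:
--     active_rows = [
--         row
--         for row in rows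
--         if _flag_as_bool(row.get("active", True)) and str(row.get("status", "100")) == "100"
--     ]
--     return active_rows or rows
--
--
-- def _find_accounting_type_by_exact_names(
--     rows: list[dict[str, Any]],
--     names: list[str],
-- ) -> dict[str, Any] | None:
--     candidates = _active_accounting_type_rows(rows)
--     wanted_names = [name.strip().lower() for name in names if name.strip()]
--     rank: dict[str, int] = {}
--     for idx, wanted in enumerate(wanted_names):
--         rank.setdefault(wanted, idx)
--     best = None
--     best_rank = None
--     for row in candidates:
--         r = rank.get(str(row.get("name", "")).strip().lower())
--         if r is not None and (best_rank is None or r < best_rank):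
--             best, best_rank = row, r
--     return best
-- ===== Notes on version B (the rewrite author's own statement) =====
-- stated objective: faster
-- what changed: A scans all candidates once per wanted name (nested wanted-outer loops); B builds a first-index rank table over the normalized wanted names once and makes a single pass over the candidate rows keeping the row with the strictly smallest rank (ties to the earlier candidate).
import Mathlib
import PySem

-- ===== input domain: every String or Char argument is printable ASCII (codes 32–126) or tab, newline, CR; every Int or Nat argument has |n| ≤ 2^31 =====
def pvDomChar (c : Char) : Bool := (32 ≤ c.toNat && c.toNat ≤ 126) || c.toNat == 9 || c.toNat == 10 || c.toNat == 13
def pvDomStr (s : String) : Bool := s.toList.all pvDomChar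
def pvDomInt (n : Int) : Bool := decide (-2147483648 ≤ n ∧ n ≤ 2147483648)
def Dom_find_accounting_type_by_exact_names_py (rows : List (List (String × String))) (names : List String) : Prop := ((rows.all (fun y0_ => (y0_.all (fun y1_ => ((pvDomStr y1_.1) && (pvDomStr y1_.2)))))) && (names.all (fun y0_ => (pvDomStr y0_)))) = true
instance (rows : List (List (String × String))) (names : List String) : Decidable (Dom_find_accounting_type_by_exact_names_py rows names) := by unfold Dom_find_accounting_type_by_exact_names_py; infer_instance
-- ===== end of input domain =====

-- B replaces A's nested wanted×candidate scan (one candidate pass per wanted name) by a rank table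
-- over the wanted names plus ONE pass over the candidate rows keeping the row of strictly smallest
-- rank (objective: faster, O(w*c) -> O(w+c); measured faster in a timing run).

-- ===== PORT A =====
-- shared helpers (the Python module shares them between A and B verbatim)
-- str(value).strip() == "1"; the isinstance-bool branch is only reached for the
-- default True of row.get("active", True), handled at the call site below.
def pvFlagAsBool (v : String) : Bool := PySem.Str.strip v == "1"

def pvActiveRows (rows : List (List (String × String))) : List (List (String × String)) :=
  let active := rows.filter (fun r =>
    (match PySem.Dict.get? (PySem.Dict.mk r) "active" with
     | none => true                 -- row.get("active", True) is the bool True → _flag_as_bool gives True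
     | some v => pvFlagAsBool v)
    && (PySem.Dict.getD (PySem.Dict.mk r) "status" "100" == "100"))
  if active = [] then rows else active

def pvNorm (s : String) : String := PySem.Str.lower (PySem.Str.strip s)

-- [name.strip().lower() for name in names if name.strip()]
def pvWanted (names : List String) : List String :=
  names.filterMap (fun n => if PySem.Str.strip n == "" then none else some (pvNorm n))

def pvRowName (r : List (String × String)) : String :=
  pvNorm (PySem.Dict.getD (PySem.Dict.mk r) "name" "")

-- the nested 'for wanted in wanted_names: for row in candidates: … return row'
def pvLoopA (cands : List (List (String × String))) (wanted : List String) :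
    Option (List (String × String)) :=
  match wanted with
  | [] => none
  | w :: ws =>
    match cands.find? (fun r => pvRowName r == w) with
    | some r => some r
    | none => pvLoopA cands ws

def find_accounting_type_by_exact_names_py (rows : List (List (String × String))) (names : List String) : Option (List (String × String)) :=
  pvLoopA (pvActiveRows rows) (pvWanted names)

-- ===== PORT B =====
-- for idx, wanted in enumerate(wanted_names): rank.setdefault(wanted, idx)
def pvRankDict (wanted : List String) : PySem.Dict String Nat :=
  (wanted.foldl (fun (s : PySem.Dict String Nat × Nat) w =>
    (s.1.setdefault w s.2, s.2 + 1)) (PySem.Dict.empty, 0)).1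

-- the single pass: keep (best, best_rank), update only on a strictly smaller rank
def pvBestStep (f : List (String × String) → Option Nat)
    (best : Option (List (String × String) × Nat)) (r : List (String × String)) :
    Option (List (String × String) × Nat) :=
  match f r with
  | none => best
  | some k =>
    match best with
    | none => some (r, k)
    | some (b, bk) => if k < bk then some (r, k) else some (b, bk)

def find_accounting_type_by_exact_names_py_alt (rows : List (List (String × String))) (names : List String) : Option (List (String × String)) :=
  let candidates := pvActiveRows rows
  let rank := pvRankDict (pvWanted names)
  ((candidates.foldl (pvBestStep (fun r => PySem.Dict.get? rank (pvRowName r))) none).map Prod.fst)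

-- ===== PRECONDITION & SPEC =====
def Spec_find_accounting_type_by_exact_names_py (rows : List (List (String × String))) (names : List String) (out : Option (List (String × String))) : Prop := out = find_accounting_type_by_exact_names_py_alt rows names
instance (rows : List (List (String × String))) (names : List String) (out : Option (List (String × String))) : Decidable (Spec_find_accounting_type_by_exact_names_py rows names out) := by unfold Spec_find_accounting_type_by_exact_names_py; infer_instance

-- ===== CLAIM (what is proved, stated in full; the proofs are below) =====
def Claim_equal_find_accounting_type_by_exact_names_py : Prop := ∀ (rows : List (List (String × String))) (names : List String), Dom_find_accounting_type_by_exact_names_py rows names → Spec_find_accounting_type_by_exact_names_py rows names (find_accounting_type_by_exact_names_py rows names)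

-- ===== LEMMAS AND PROOFS =====

-- first index of w in ws (abstract view of both A's scan order and B's rank table)
def pvFirstIdx (ws : List String) (w : String) : Option Nat :=
  match ws with
  | [] => none
  | x :: t => if x == w then some 0 else (pvFirstIdx t w).map (· + 1)

-- the rank dict looks up the first index
theorem pvRank_fold_get (ws : List String) :
    ∀ (d : PySem.Dict String Nat) (i : Nat) (w : String),
      (ws.foldl (fun (s : PySem.Dict String Nat × Nat) x =>
        (s.1.setdefault x s.2, s.2 + 1)) (d, i)).1.get? w
      = (match d.get? w with
         | some v => some v
         | none => (pvFirstIdx ws w).map (i + ·)) := by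
  induction ws with
  | nil =>
    intro d i w
    cases h : d.get? w <;> simp [pvFirstIdx, h]
  | cons x t ih =>
    intro d i w
    simp only [List.foldl_cons, ih, pvFirstIdx]
    by_cases hw : w = x
    · subst hw
      rw [PySem.Dict.get?_setdefault_self]
      cases h : d.get? w with
      | none => simp
      | some v => simp
    · rw [PySem.Dict.get?_setdefault_of_ne _ _ hw]
      cases h : d.get? w with
      | none =>
        have hx : (x == w) = false := by simp [Ne.symm hw]
        simp only [hx, Bool.false_eq_true, if_false]
        cases pvFirstIdx t w with
        | none => simp
        | some j => simp; omega
      | some v => simp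

theorem pvRank_get (ws : List String) (w : String) :
    (pvRankDict ws).get? w = pvFirstIdx ws w := by
  unfold pvRankDict
  rw [pvRank_fold_get]
  simp [PySem.Dict.get?_empty]

-- once a rank-0 best is held, nothing replaces it
theorem pvZero_sticks (f : List (String × String) → Option Nat)
    (l : List (List (String × String))) (b : List (String × String)) :
    l.foldl (pvBestStep f) (some (b, 0)) = some (b, 0) := by
  induction l with
  | nil => rfl
  | cons x t ih =>
    simp only [List.foldl_cons]
    have : pvBestStep f (some (b, 0)) x = some (b, 0) := by
      unfold pvBestStep
      cases f x with
      | none => rfl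
      | some k => simp
    rw [this, ih]

-- if some element has rank 0, the fold returns the FIRST such element with rank 0
theorem pvZero_first (f : List (String × String) → Option Nat)
    (l : List (List (String × String))) :
    ∀ (acc : Option (List (String × String) × Nat)) (r0 : List (String × String)),
      l.find? (fun r => f r == some 0) = some r0 →
      (∀ b k, acc = some (b, k) → 0 < k) →
      l.foldl (pvBestStep f) acc = some (r0, 0) := by
  induction l with
  | nil => intro acc r0 h; simp at h
  | cons x t ih =>
    intro acc r0 hfind hacc
    by_cases hx : f x = some 0
    · rw [List.find?_cons_of_pos (p := fun r => f r == some 0) (by simp [hx])] at hfind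
      injection hfind with h0; subst h0
      have hstep : pvBestStep f acc x = some (x, 0) := by
        unfold pvBestStep
        rw [hx]
        cases acc with
        | none => rfl
        | some p =>
          obtain ⟨b, k⟩ := p
          have := hacc b k rfl
          simp [this]
      simp only [List.foldl_cons, hstep]
      exact pvZero_sticks f t x
    · rw [List.find?_cons_of_neg (p := fun r => f r == some 0) (by simp [hx])] at hfind
      simp only [List.foldl_cons]
      apply ih _ r0 hfind
      intro b k hbk
      unfold pvBestStep at hbk
      cases hfx : f x with
      | none =>
        rw [hfx] at hbk
        exact hacc b k hbk
      | some m =>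
        rw [hfx] at hbk
        have hm : 0 < m := by
          rcases Nat.eq_zero_or_pos m with h | h
          · exact absurd (h ▸ hfx) hx
          · exact h
        cases acc with
        | none =>
          injection hbk with h1
          injection h1 with h2 h3
          omega
        | some p =>
          obtain ⟨b', k'⟩ := p
          have hk' := hacc b' k' rfl
          by_cases hlt : m < k'
          · simp [hlt] at hbk
            omega
          · simp [hlt] at hbk
            omega

-- shifting every rank by +1 commutes with the fold
theorem pvShift (f : List (String × String) → Option Nat)
    (l : List (List (String × String))) :
    ∀ (acc : Option (List (String × String) × Nat)),
      l.foldl (pvBestStep (fun r => (f r).map (· + 1)))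
        (acc.map (fun p => (p.1, p.2 + 1)))
      = (l.foldl (pvBestStep f) acc).map (fun p => (p.1, p.2 + 1)) := by
  induction l with
  | nil => intro acc; rfl
  | cons x t ih =>
    intro acc
    simp only [List.foldl_cons]
    have hstep : pvBestStep (fun r => (f r).map (· + 1)) (acc.map (fun p => (p.1, p.2 + 1))) x
        = (pvBestStep f acc x).map (fun p => (p.1, p.2 + 1)) := by
      unfold pvBestStep
      cases hfx : f x with
      | none => simp [hfx]
      | some k =>
        cases acc with
        | none => simp [hfx]
        | some p =>
          obtain ⟨b, bk⟩ := p
          simp only [hfx, Option.map_some]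
          by_cases hlt : k < bk
          · rw [if_pos (show k + 1 < bk + 1 by omega), if_pos hlt]
            rfl
          · rw [if_neg (show ¬ k + 1 < bk + 1 by omega), if_neg hlt]
            rfl
    rw [hstep, ih]

-- two pointwise-equal predicates find the same element (no such lemma in the library)
theorem pvFind?_congr {α : Type} (l : List α) (p q : α → Bool)
    (h : ∀ x ∈ l, p x = q x) : l.find? p = l.find? q := by
  induction l with
  | nil => rfl
  | cons x t ih =>
    simp only [List.find?_cons]
    rw [h x (List.mem_cons_self)]
    cases q x with
    | true => rfl
    | false => exact ih (fun y hy => h y (List.mem_cons_of_mem _ hy))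

-- A's nested loops equal B's single pass keyed by first index
theorem pvCore (cands : List (List (String × String))) :
    ∀ ws : List String,
      pvLoopA cands ws
      = (cands.foldl (pvBestStep (fun r => pvFirstIdx ws (pvRowName r))) none).map Prod.fst := by
  intro ws
  induction ws with
  | nil =>
    have h : cands.foldl (pvBestStep (fun r => pvFirstIdx [] (pvRowName r))) none = none := by
      rw [PySem.List.foldl_congr_mem
        (g := fun (acc : Option (List (String × String) × Nat)) _ => acc)]
      · exact PySem.List.foldl_ignore _ _
      · intro acc x _
        unfold pvBestStep pvFirstIdx
        rfl
    rw [h]; rfl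
  | cons w ws ih =>
    cases hfind : cands.find? (fun r => pvRowName r == w) with
    | some r0 =>
      have hfind' : cands.find? (fun r => pvFirstIdx (w :: ws) (pvRowName r) == some 0)
          = some r0 := by
        rw [← hfind]
        apply pvFind?_congr
        intro r _
        unfold pvFirstIdx
        by_cases h : pvRowName r = w
        · have hb : (w == pvRowName r) = true := by simp [h]
          simp [h]
        · have hb : (w == pvRowName r) = false := by simp [Ne.symm h]
          simp only [hb, Bool.false_eq_true, if_false]
          cases pvFirstIdx ws (pvRowName r) <;> simp [h]
      rw [pvZero_first _ _ none r0 hfind' (by intro b k h; cases h)]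
      unfold pvLoopA
      rw [hfind]
      rfl
    | none =>
      have hnone : ∀ r ∈ cands, pvRowName r ≠ w := by
        intro r hr
        have := List.find?_eq_none.mp hfind r hr
        simpa using this
      have hcongr : cands.foldl (pvBestStep (fun r => pvFirstIdx (w :: ws) (pvRowName r))) none
          = cands.foldl (pvBestStep (fun r => (pvFirstIdx ws (pvRowName r)).map (· + 1))) none := by
        apply PySem.List.foldl_congr_mem
        intro acc r hr
        have h1 : (w == pvRowName r) = false := by
          simp [Ne.symm (hnone r hr)]
        unfold pvBestStep
        simp only [pvFirstIdx, h1, Bool.false_eq_true, if_false]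
      rw [hcongr]
      have hsh := pvShift (fun r => pvFirstIdx ws (pvRowName r)) cands none
      simp only [Option.map_none] at hsh
      rw [hsh]
      unfold pvLoopA
      rw [hfind, ih]
      cases cands.foldl (pvBestStep (fun r => pvFirstIdx ws (pvRowName r))) none with
      | none => rfl
      | some p => rfl

-- ===== VERDICT (by name: the statement is the Claim_ definition above) =====
theorem find_accounting_type_by_exact_names_py_spec : Claim_equal_find_accounting_type_by_exact_names_py := by
  intro rows names _
  unfold Spec_find_accounting_type_by_exact_names_py
  unfold find_accounting_type_by_exact_names_py find_accounting_type_by_exact_names_py_alt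
  simp only
  rw [pvCore]
  congr 1
  apply PySem.List.foldl_congr_mem
  intro acc r _
  simp only [pvRank_get]
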